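-- pv_equiv track=rewrite | github.com/student-1201/UMFALeague-1 | league_manager.py | format_scorers_ui
-- ===== SOURCE A (Python) =====
-- def format_scorers_ui(s_list):
--     if not s_list: return ""
--     counts = {}
--     for s in s_list:
--         counts[s] = counts.get(s, 0) + 1
--     parts = []
--     for name, count in counts.items():
--         parts.append(f"{name}({count})" if count > 1 else name)
--     return ", ".join(parts)
-- ===== SOURCE B (Python) =====
-- def format_scorers_ui(s_list):
--     parts = []
--     rest = s_list
--     while rest:
--         name = rest[0]
--         tail = [y for y in rest[1:] if y != name]
--         c = len(rest) - len(tail)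
--         parts.append(f"{name}({c})" if c > 1 else name)
--         rest = tail
--     return ", ".join(parts)
-- ===== Notes on version B (the rewrite author's own statement) =====
-- stated objective: alternative
-- what changed: Replaces A's counts-dict build (one table pass, then iterate items) by a shrinking-list partition: repeatedly take the first remaining name, count it as the length drop when all its occurrences are filtered out, emit its part, and loop on the filtered remainder; no dict, no per-name table is ever maintained.
import Mathlib
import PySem

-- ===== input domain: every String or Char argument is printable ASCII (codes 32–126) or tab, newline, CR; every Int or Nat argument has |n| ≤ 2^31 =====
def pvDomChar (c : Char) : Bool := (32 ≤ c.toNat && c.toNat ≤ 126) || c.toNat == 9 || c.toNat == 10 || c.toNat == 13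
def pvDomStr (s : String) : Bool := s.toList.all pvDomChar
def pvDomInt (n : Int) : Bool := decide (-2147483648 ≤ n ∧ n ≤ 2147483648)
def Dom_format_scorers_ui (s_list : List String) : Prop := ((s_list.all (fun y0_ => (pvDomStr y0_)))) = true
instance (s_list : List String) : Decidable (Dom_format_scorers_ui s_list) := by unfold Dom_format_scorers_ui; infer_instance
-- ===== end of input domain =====

-- B replaces A's counts-dict build by a shrinking-list partition: take the first name, count
-- it by removing all its occurrences, emit its part, recurse on the remainder (alternative).

-- ===== PORT A =====
def format_scorers_ui (s_list : List String) : String :=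
  if s_list = [] then "" else
  let counts : PySem.Dict String Int :=
    s_list.foldl (fun d s => d.insert s (d.getD s 0 + 1)) PySem.Dict.empty
  let parts : List String :=
    counts.items.foldl (fun parts (nc : String × Int) =>
      parts ++ [if nc.2 > 1 then nc.1 ++ "(" ++ PySem.Int.toStr nc.2 ++ ")" else nc.1]) []
  PySem.Str.join ", " parts

-- ===== PORT B =====
-- the while loop of Source B, consuming 'rest' (which strictly shrinks) and building 'parts'
def pvPartsB : List String → List String
  | [] => []
  | name :: rest1 =>
      let tail := rest1.filter (fun y => y ≠ name)
      let c : Int := ((rest1.length + 1 : Nat) : Int) - ((tail.length : Nat) : Int)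
      (if c > 1 then name ++ "(" ++ PySem.Int.toStr c ++ ")" else name) :: pvPartsB tail
  termination_by l => l.length
  decreasing_by
    simp
    exact le_trans (List.length_filter_le _ _) (by simp)

def format_scorers_ui_alt (s_list : List String) : String :=
  PySem.Str.join ", " (pvPartsB s_list)

-- ===== PRECONDITION & SPEC =====
def Spec_format_scorers_ui (s_list : List String) (out : String) : Prop := out = format_scorers_ui_alt s_list
instance (s_list : List String) (out : String) : Decidable (Spec_format_scorers_ui s_list out) := by unfold Spec_format_scorers_ui; infer_instance

-- ===== CLAIM (what is proved, stated in full; the proofs are below) =====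
def Claim_equal_format_scorers_ui : Prop := ∀ (s_list : List String), Dom_format_scorers_ui s_list → Spec_format_scorers_ui s_list (format_scorers_ui s_list)

-- ===== LEMMAS AND PROOFS =====

-- removing every occurrence of x shortens the list by exactly the number of x's
lemma pv_filter_count (rest : List String) (x : String) :
    (rest.filter (fun y => decide (y ≠ x))).length + rest.count x = rest.length := by
  induction rest with
  | nil => rfl
  | cons y l ih =>
    by_cases h : y = x
    · rw [List.filter_cons_of_neg (by simp [h]), List.count_cons, if_pos (by simp [h]),
        List.length_cons, ← ih]
      omega
    · rw [List.filter_cons_of_pos (by simp [h]), List.count_cons, if_neg (by simpa using h),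
        List.length_cons, List.length_cons, ← ih]
      omega

-- folding Set.add from a state whose head cannot recur keeps that head in front
lemma pv_foldl_add_cons (l : List String) (x : String) (s : List String) (hx : x ∉ l) :
    l.foldl PySem.Set.add (x :: s) = x :: l.foldl PySem.Set.add s := by
  induction l generalizing s with
  | nil => rfl
  | cons y l ih =>
      have hyx : y ≠ x := fun h => hx (h ▸ List.mem_cons_self)
      have hstep : PySem.Set.add (x :: s) y = x :: PySem.Set.add s y := by
        simp only [PySem.Set.add, PySem.Set.contains]
        by_cases hy : y ∈ s <;> simp [hy, hyx]
      simp only [List.foldl_cons, hstep]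
      exact ih (PySem.Set.add s y) (fun h => hx (List.mem_cons_of_mem _ h))

-- elements already in the accumulator can be filtered out of the fold
lemma pv_foldl_add_filter (l : List String) (s : List String) (x : String)
    (hx : x ∈ s) :
    l.foldl PySem.Set.add s = (l.filter (fun y => y ≠ x)).foldl PySem.Set.add s := by
  induction l generalizing s with
  | nil => rfl
  | cons y l ih =>
      by_cases h : y = x
      · subst h
        have hadd : PySem.Set.add s y = s := by
          simp [PySem.Set.add, PySem.Set.contains, hx]
        simp only [List.filter_cons, decide_eq_true_eq]
        rw [if_neg (by simp)]
        simp only [List.foldl_cons, hadd]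
        exact ih s hx
      · have hmem : x ∈ PySem.Set.add s y := by
          simp only [PySem.Set.add, PySem.Set.contains]
          split
          · exact hx
          · exact List.mem_append_left _ hx
        simp only [List.filter_cons, decide_eq_true_eq]
        rw [if_pos (by simpa using h)]
        simp only [List.foldl_cons]
        exact ih (PySem.Set.add s y) hmem

-- first-appearance dedup of a cons: head, then dedup of the tail with the head removed
lemma pv_ofList_cons (x : String) (rest : List String) :
    PySem.Set.ofList (x :: rest) =
      x :: PySem.Set.ofList (rest.filter (fun y => y ≠ x)) := by
  show (x :: rest).foldl PySem.Set.add [] = _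
  have h1 : (x :: rest).foldl PySem.Set.add [] = rest.foldl PySem.Set.add [x] := rfl
  rw [h1, pv_foldl_add_filter rest [x] x (List.mem_singleton.mpr rfl)]
  exact pv_foldl_add_cons _ x [] (by simp)

-- the map over the counter's keys IS B's partition recursion
lemma pv_map_eq_partsB (xs : List String) :
    (PySem.Set.ofList xs).map
      (fun k => if (xs.count k : Int) > 1
        then k ++ "(" ++ PySem.Int.toStr (xs.count k : Int) ++ ")" else k)
      = pvPartsB xs := by
  induction hn : xs.length using Nat.strong_induction_on generalizing xs with
  | _ n ih =>
    match xs with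
    | [] => rw [pvPartsB.eq_1]; rfl
    | x :: rest =>
      set tail := rest.filter (fun y => decide (y ≠ x)) with htail
      -- count of the head: everything removed by the filter, plus the head itself
      have hcx : ((x :: rest).count x : Int)
          = ((rest.length + 1 : Nat) : Int) - ((tail.length : Nat) : Int) := by
        have h1 := pv_filter_count rest x
        have h2 : (x :: rest).count x = rest.count x + 1 := by
          rw [List.count_cons, if_pos (by simp)]
        rw [h2, ← htail] at *
        omega
      -- counts of the other names survive the filter
      have hct : ∀ k ∈ PySem.Set.ofList tail, ((x :: rest).count k : Int) = (tail.count k : Int) := by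
        intro k hk
        have hk' : k ∈ tail := (PySem.Set.mem_ofList tail k).mp hk
        have hkx : k ≠ x := by
          have := (List.mem_filter.mp (htail ▸ hk')).2
          simpa using this
        have hrest : rest.count k = tail.count k := by
          rw [htail, List.count_filter]
          simp [hkx]
        have : (x :: rest).count k = rest.count k := by
          rw [List.count_cons, if_neg (by simpa using Ne.symm hkx), Nat.add_zero]
        rw [this, hrest]
      have hcons : PySem.Set.ofList (x :: rest) = x :: PySem.Set.ofList tail := by
        rw [pv_ofList_cons]
      rw [hcons, List.map_cons]
      have hrhs : pvPartsB (x :: rest) =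
          (if (((rest.length + 1 : Nat) : Int) - ((tail.length : Nat) : Int)) > 1
            then x ++ "(" ++ PySem.Int.toStr (((rest.length + 1 : Nat) : Int) - ((tail.length : Nat) : Int)) ++ ")" else x)
            :: pvPartsB tail := by
        rw [pvPartsB.eq_def]
      rw [hrhs]
      congr 1
      · rw [hcx]
      · have hmap : (PySem.Set.ofList tail).map
            (fun k => if ((x :: rest).count k : Int) > 1
              then k ++ "(" ++ PySem.Int.toStr ((x :: rest).count k : Int) ++ ")" else k)
            = (PySem.Set.ofList tail).map
            (fun k => if ((tail.count k : Int)) > 1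
              then k ++ "(" ++ PySem.Int.toStr ((tail.count k : Int)) ++ ")" else k) := by
          apply List.map_congr_left
          intro k hk
          rw [hct k hk]
        rw [hmap]
        exact ih tail.length (by
          have h1 : tail.length ≤ rest.length := htail ▸ List.length_filter_le _ _
          simp only [← hn, List.length_cons]
          omega) tail rfl

-- ===== VERDICT (by name: the statement is the Claim_ definition above) =====
theorem format_scorers_ui_spec : Claim_equal_format_scorers_ui := by
  intro s_list _
  unfold Spec_format_scorers_ui format_scorers_ui format_scorers_ui_alt
  by_cases h : s_list = []
  · subst h
    rw [show pvPartsB [] = [] from pvPartsB.eq_1]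
    rfl
  · simp only [h, if_false]
    rw [PySem.Dict.foldl_insert_getD_add_one_eq_counter, PySem.Dict.items_counter,
      PySem.List.foldl_append_singleton_eq_map, List.map_map, List.nil_append]
    rw [show ((fun nc : String × Int =>
        if nc.2 > 1 then nc.1 ++ "(" ++ PySem.Int.toStr nc.2 ++ ")" else nc.1) ∘
        (fun k => (k, (s_list.count k : Int))))
      = (fun k => if (s_list.count k : Int) > 1
          then k ++ "(" ++ PySem.Int.toStr (s_list.count k : Int) ++ ")" else k) from rfl]
    rw [pv_map_eq_partsB]
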